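-- pv_equiv track=rewrite | github.com/Jojo3235/sim_Ex_3_Jorge_A | rail_fence.py | marcar_matriz
-- ===== SOURCE A (Python) =====
-- def marcar_matriz(filas, mensaje, matriz):
--     fila = 0
--     columna = 0
--     for i in range(len(mensaje)):
--         matriz[fila][i] = mensaje[i]
--         if fila == 0:
--             columna = 0
--         elif fila == filas-1:
--             columna = 1
--         if columna == 0:
--             fila += 1
--         else:
--             fila -= 1
--     return matriz
-- ===== SOURCE B (Python) =====
-- def marcar_matriz(filas, mensaje, matriz):
--     period = 2 * (filas - 1)
--     for i, ch in enumerate(mensaje):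
--         pos = i % period
--         row = pos if pos < filas else period - pos
--         matriz[row][i] = ch
--     return matriz
-- ===== Notes on version B (the rewrite author's own statement) =====
-- stated objective: alternative
-- what changed: Replaces A's stateful zigzag simulation (a bouncing row pointer with a direction flag updated each step) by a closed-form per-column computation: row = pos if pos < filas else period - pos with pos = i % period, period = 2*(filas-1).
-- outside the precondition, e.g. on marcar_matriz(0, 'a', [['x', 'y']]): A returns [['a', 'y']], B raises IndexError
import Mathlib
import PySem

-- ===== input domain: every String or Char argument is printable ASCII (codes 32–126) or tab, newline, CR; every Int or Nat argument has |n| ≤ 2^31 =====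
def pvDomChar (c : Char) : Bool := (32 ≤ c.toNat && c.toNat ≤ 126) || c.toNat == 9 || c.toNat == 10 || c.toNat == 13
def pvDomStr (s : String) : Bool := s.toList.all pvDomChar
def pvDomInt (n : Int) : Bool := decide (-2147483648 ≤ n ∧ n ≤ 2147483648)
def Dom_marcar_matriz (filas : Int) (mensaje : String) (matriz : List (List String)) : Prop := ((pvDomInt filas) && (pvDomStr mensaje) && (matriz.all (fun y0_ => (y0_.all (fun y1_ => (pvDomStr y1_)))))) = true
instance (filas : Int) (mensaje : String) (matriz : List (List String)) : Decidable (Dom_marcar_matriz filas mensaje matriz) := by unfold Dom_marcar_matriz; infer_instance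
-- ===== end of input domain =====

-- B replaces A's stateful bouncing-pointer zigzag by a closed-form per-column row computation
-- (row from i % (2*(filas-1))); same cost, different decomposition. Both A and B mutate
-- `matriz` in place in Python (the same writes in the same order); the equivalence proved
-- here is about the returned value.

-- ===== PORT A =====
def marcar_matriz (filas : Int) (mensaje : String) (matriz : List (List String)) : List (List String) :=
  let ms := mensaje.toList
  (((PySem.List.pyRange 0 (ms.length : Int)).foldl
    (fun (st : List (List String) × Int × Int) (i : Int) =>
      let m := st.1
      let fila := st.2.1
      let columna := st.2.2
      let m' := PySem.List.pySetD m fila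
        (PySem.List.pySetD (PySem.List.pyGetD m fila []) i (String.ofList [PySem.List.pyGetD ms i ' ']))
      let columna' := if fila = 0 then (0 : Int) else if fila = filas - 1 then 1 else columna
      let fila' := if columna' = 0 then fila + 1 else fila - 1
      (m', fila', columna'))
    (matriz, 0, 0))).1

-- ===== PORT B =====
def marcar_matriz_alt (filas : Int) (mensaje : String) (matriz : List (List String)) : List (List String) :=
  let period := 2 * (filas - 1)
  (PySem.List.enumerate mensaje.toList).foldl
    (fun (m : List (List String)) (p : Int × Char) =>
      let pos := PySem.Int.mod p.1 period
      let row := if pos < filas then pos else period - pos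
      PySem.List.pySetD m row
        (PySem.List.pySetD (PySem.List.pyGetD m row []) p.1 (String.ofList [p.2])))
    matriz

-- ===== PRECONDITION & SPEC =====
-- the closed-form rail of column i (used by Pre_ and the proofs only)
def pvRow (filas i : Int) : Int :=
  let pos := i % (2 * (filas - 1))
  if pos < filas then pos else 2 * (filas - 1) - pos

-- Pre_ restricts to the rail-fence cipher's natural domain filas ≥ 2 (plus the trivially fine
-- empty message) and to matrices tall/wide enough for the zigzag writes: on filas ≤ 1 with a
-- nonempty mensaje A's runaway row pointer sometimes returns an accidental diagonal fill while
-- B's closed-form period is undefined and raises; on too-small matrices A raises IndexError.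
def Pre_marcar_matriz (filas : Int) (mensaje : String) (matriz : List (List String)) : Prop :=
  (mensaje.toList.length = 0 ∨ 2 ≤ filas) ∧
  ∀ i < mensaje.toList.length,
    (pvRow filas (i : Int)).toNat < matriz.length ∧
    i < (matriz.getD (pvRow filas (i : Int)).toNat []).length
instance (filas : Int) (mensaje : String) (matriz : List (List String)) : Decidable (Pre_marcar_matriz filas mensaje matriz) := by unfold Pre_marcar_matriz; infer_instance

def pvWitness_marcar_matriz : Int × String × List (List String) :=
  (3, "hola", [[".", ".", ".", "."], [".", ".", ".", "."], [".", ".", ".", "."]])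

def Spec_marcar_matriz (filas : Int) (mensaje : String) (matriz : List (List String)) (out : List (List String)) : Prop := out = marcar_matriz_alt filas mensaje matriz
instance (filas : Int) (mensaje : String) (matriz : List (List String)) (out : List (List String)) : Decidable (Spec_marcar_matriz filas mensaje matriz out) := by unfold Spec_marcar_matriz; infer_instance

-- ===== CLAIM (what is proved, stated in full; the proofs are below) =====
def Claim_equal_marcar_matriz : Prop := ∀ (filas : Int) (mensaje : String) (matriz : List (List String)), Dom_marcar_matriz filas mensaje matriz → Pre_marcar_matriz filas mensaje matriz → Spec_marcar_matriz filas mensaje matriz (marcar_matriz filas mensaje matriz)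

-- ===== LEMMAS AND PROOFS =====

-- A's loop body (exactly the lambda in the port of A)
def fA (filas : Int) (ms : List Char) (st : List (List String) × Int × Int) (i : Int) : List (List String) × Int × Int :=
  let m := st.1
  let fila := st.2.1
  let columna := st.2.2
  let m' := PySem.List.pySetD m fila
    (PySem.List.pySetD (PySem.List.pyGetD m fila []) i (String.ofList [PySem.List.pyGetD ms i ' ']))
  let columna' := if fila = 0 then (0 : Int) else if fila = filas - 1 then 1 else columna
  let fila' := if columna' = 0 then fila + 1 else fila - 1
  (m', fila', columna')

-- B's loop body after `enumerate` is written as a map over the index range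
def fB (filas : Int) (ms : List Char) (m : List (List String)) (j : Int) : List (List String) :=
  let pos := PySem.Int.mod j (2 * (filas - 1))
  let row := if pos < filas then pos else 2 * (filas - 1) - pos
  PySem.List.pySetD m row
    (PySem.List.pySetD (PySem.List.pyGetD m row []) j (String.ofList [PySem.List.pyGetD ms j ' ']))

-- the direction flag A keeps between two boundary hits
def pvCol (filas : Int) (k : Nat) : Int :=
  if (k : Int) % (2 * (filas - 1)) < filas - 1 then 0 else 1

lemma emod_succ (k p : Int) (hp : 1 < p) :
    (k + 1) % p = if k % p + 1 = p then 0 else k % p + 1 := by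
  have h1 : (1 : Int) % p = 1 := Int.emod_eq_of_lt (by omega) hp
  have hlt : k % p < p := Int.emod_lt_of_pos k (by omega)
  have hge : 0 ≤ k % p := Int.emod_nonneg k (by omega)
  rw [Int.add_emod, h1]
  split_ifs with h
  · rw [h, Int.emod_self]
  · exact Int.emod_eq_of_lt (by omega) (by omega)

lemma pvRow_succ (filas : Int) (h2 : 2 ≤ filas) (k : Nat) (col : Int)
    (hcol : 0 < pvRow filas (k : Int) → pvRow filas (k : Int) < filas - 1 → col = pvCol filas k) :
    pvRow filas ((k : Int) + 1) =
      (if (if pvRow filas (k : Int) = 0 then (0 : Int)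
            else if pvRow filas (k : Int) = filas - 1 then 1 else col) = 0
       then pvRow filas (k : Int) + 1 else pvRow filas (k : Int) - 1) := by
  have hp : 1 < 2 * (filas - 1) := by omega
  have hs := emod_succ (k : Int) (2 * (filas - 1)) hp
  have hlt : (k : Int) % (2 * (filas - 1)) < 2 * (filas - 1) := Int.emod_lt_of_pos _ (by omega)
  have hge : 0 ≤ (k : Int) % (2 * (filas - 1)) := Int.emod_nonneg _ (by omega)
  simp only [pvRow, pvCol] at *
  rw [hs]
  split_ifs at * <;> omega

lemma pvCol_succ (filas : Int) (h2 : 2 ≤ filas) (k : Nat) (col : Int)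
    (hcol : 0 < pvRow filas (k : Int) → pvRow filas (k : Int) < filas - 1 → col = pvCol filas k) :
    0 < pvRow filas ((k : Int) + 1) → pvRow filas ((k : Int) + 1) < filas - 1 →
      (if pvRow filas (k : Int) = 0 then (0 : Int)
        else if pvRow filas (k : Int) = filas - 1 then 1 else col) = pvCol filas (k + 1) := by
  have hp : 1 < 2 * (filas - 1) := by omega
  have hs := emod_succ (k : Int) (2 * (filas - 1)) hp
  have hlt : (k : Int) % (2 * (filas - 1)) < 2 * (filas - 1) := Int.emod_lt_of_pos _ (by omega)
  have hge : 0 ≤ (k : Int) % (2 * (filas - 1)) := Int.emod_nonneg _ (by omega)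
  intro ha hb
  simp only [pvRow, pvCol] at *
  push_cast at *
  rw [hs] at ha hb ⊢
  split_ifs at * <;> omega

-- the matrices written at step k agree (A writes at its pointer, B at the closed-form row)
lemma write_eq (filas : Int) (h2 : 2 ≤ filas) (ms : List Char) (k : Nat)
    (m : List (List String)) (col : Int) :
    (fA filas ms (m, pvRow filas (k : Int), col) (k : Int)).1 = fB filas ms m (k : Int) := by
  have hmod : PySem.Int.mod (k : Int) (2 * (filas - 1)) = (k : Int) % (2 * (filas - 1)) :=
    PySem.Int.mod_eq_emod_of_pos (by omega)
  simp only [fA, fB, pvRow, hmod]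

lemma zig_loop (filas : Int) (h2 : 2 ≤ filas) (ms : List Char) :
    ∀ (cnt k : Nat) (m : List (List String)) (fila col : Int),
      fila = pvRow filas (k : Int) →
      (0 < fila → fila < filas - 1 → col = pvCol filas k) →
      ((PySem.List.pyRange (k : Int) ((k : Int) + (cnt : Int))).foldl (fA filas ms) (m, fila, col)).1
        = (PySem.List.pyRange (k : Int) ((k : Int) + (cnt : Int))).foldl (fB filas ms) m := by
  intro cnt
  induction cnt with
  | zero =>
    intro k m fila col _ _
    simp [PySem.List.pyRange]
  | succ n ih =>
    intro k m fila col hfila hcol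
    have hlt : (k : Int) < (k : Int) + ((n : Int) + 1) := by omega
    have hcons := PySem.List.pyRange_one_cons (a := (k : Int)) (b := (k : Int) + ((n + 1 : Nat) : Int)) (by push_cast; omega)
    rw [hcons, List.foldl_cons, List.foldl_cons]
    have hstep : fA filas ms (m, fila, col) (k : Int)
        = ((fB filas ms m (k : Int)),
           (if (if fila = 0 then (0 : Int) else if fila = filas - 1 then 1 else col) = 0
            then fila + 1 else fila - 1),
           (if fila = 0 then (0 : Int) else if fila = filas - 1 then 1 else col)) := by
      subst hfila
      rw [← write_eq filas h2 ms k m col]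
      rfl
    rw [hstep]
    have hre : (k : Int) + 1 = ((k + 1 : Nat) : Int) := by push_cast; ring
    have hre2 : (k : Int) + ((n + 1 : Nat) : Int) = ((k + 1 : Nat) : Int) + (n : Int) := by push_cast; ring
    rw [hre2, hre]
    subst hfila
    have hrow := pvRow_succ filas h2 k col hcol
    have hcol' := pvCol_succ filas h2 k col hcol
    rw [hre] at hrow hcol'
    apply ih (k + 1)
    · exact hrow.symm
    · intro ha hb
      exact hcol' (by rw [hrow]; exact ha) (by rw [hrow]; exact hb)

-- both ports are the corresponding fold over the index range
lemma portA_eq (filas : Int) (mensaje : String) (matriz : List (List String)) :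
    marcar_matriz filas mensaje matriz
      = ((PySem.List.pyRange 0 (mensaje.toList.length : Int)).foldl (fA filas mensaje.toList) (matriz, 0, 0)).1 := rfl

lemma portB_eq (filas : Int) (mensaje : String) (matriz : List (List String)) :
    marcar_matriz_alt filas mensaje matriz
      = (PySem.List.pyRange 0 (mensaje.toList.length : Int)).foldl (fB filas mensaje.toList) matriz := by
  show (PySem.List.enumerate mensaje.toList).foldl _ matriz = _
  rw [PySem.List.enumerate_eq_map_pyRange mensaje.toList ' ', List.foldl_map]
  rfl

-- ===== VERDICT (by name: the statement is the Claim_ definition above) =====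
theorem marcar_matriz_spec : Claim_equal_marcar_matriz := by
  intro filas mensaje matriz _ hpre
  unfold Spec_marcar_matriz
  rw [portA_eq, portB_eq]
  rcases hpre.1 with hnil | h2
  · have : mensaje.toList.length = 0 := hnil
    rw [this]
    simp [PySem.List.pyRange]
  · have h := zig_loop filas h2 mensaje.toList mensaje.toList.length 0 matriz 0 0
      (by simp [pvRow]; omega) (fun _ _ => by simp [pvCol]; omega)
    simpa using h
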